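-- pv_equiv track=rewrite | github.com/benquick123/code-profiling | code/batch-2/dn10 - premozenje novakovih/M-17093-2346.py | najbogatejsi
-- ===== SOURCE A (Python) =====
-- otroci = {
--     "Adam": ["Matjaž", "Cilka", "Daniel"],
--     "Aleksander": [],
--     "Alenka": [],
--     "Barbara": [],
--     "Cilka": [],
--     "Daniel": ["Elizabeta", "Hans"],
--     "Erik": [],
--     "Elizabeta": ["Ludvik", "Jurij", "Barbara"],
--     "Franc": [],
--     "Herman": ["Margareta"],
--     "Hans": ["Herman", "Erik"],
--     "Jožef": ["Alenka", "Aleksander", "Petra"],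
--     "Jurij": ["Franc", "Jožef"],
--     "Ludvik": [],
--     "Margareta": [],
--     "Matjaž": ["Viljem"],
--     "Petra": [],
--     "Tadeja": [],
--     "Viljem": ["Tadeja"],
-- }
--
-- def najbogatejsi(oseba, denar):
--     najvec = (oseba, denar[oseba])
--     if not otroci[oseba]:
--         return najvec
--     else:
--         for otrok in otroci[oseba]:
--             naj_otrok = najbogatejsi(otrok, denar)
--             if naj_otrok[1] > najvec[1]:
--                 najvec = naj_otrok
--         return najvec
-- ===== SOURCE B (Python) =====
-- otroci = {
--     "Adam": ["Matjaž", "Cilka", "Daniel"],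
--     "Aleksander": [],
--     "Alenka": [],
--     "Barbara": [],
--     "Cilka": [],
--     "Daniel": ["Elizabeta", "Hans"],
--     "Erik": [],
--     "Elizabeta": ["Ludvik", "Jurij", "Barbara"],
--     "Franc": [],
--     "Herman": ["Margareta"],
--     "Hans": ["Herman", "Erik"],
--     "Jožef": ["Alenka", "Aleksander", "Petra"],
--     "Jurij": ["Franc", "Jožef"],
--     "Ludvik": [],
--     "Margareta": [],
--     "Matjaž": ["Viljem"],
--     "Petra": [],
--     "Tadeja": [],
--     "Viljem": ["Tadeja"],
-- }
--
-- def najbogatejsi(oseba, denar):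
--     # Iterative preorder traversal with an explicit stack, then one max().
--     vals = []
--     stack = [oseba]
--     while stack:
--         p = stack.pop()
--         vals.append((p, denar[p]))
--         stack.extend(reversed(otroci[p]))
--     return max(vals, key=lambda t: t[1])
-- ===== Notes on version B (the rewrite author's own statement) =====
-- stated objective: alternative
-- what changed: A's recursive descent (recursively taking the max over each child's subtree) is replaced by an iterative preorder traversal with an explicit stack that collects all (person, money) pairs and a single final max(..., key=...) call.
import Mathlib
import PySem

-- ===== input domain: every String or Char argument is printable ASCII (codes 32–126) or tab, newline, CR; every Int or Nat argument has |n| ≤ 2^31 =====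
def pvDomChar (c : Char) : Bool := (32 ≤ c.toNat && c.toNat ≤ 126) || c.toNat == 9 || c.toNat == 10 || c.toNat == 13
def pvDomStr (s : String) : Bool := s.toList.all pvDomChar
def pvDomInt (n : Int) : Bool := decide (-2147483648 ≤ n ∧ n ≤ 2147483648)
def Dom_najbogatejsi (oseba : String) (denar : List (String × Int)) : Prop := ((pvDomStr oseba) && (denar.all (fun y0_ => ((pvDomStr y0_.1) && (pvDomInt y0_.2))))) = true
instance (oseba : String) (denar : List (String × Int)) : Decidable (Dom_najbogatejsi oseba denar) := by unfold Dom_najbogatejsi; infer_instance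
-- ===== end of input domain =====

-- B replaces A's recursion by an explicit-stack preorder traversal followed by one max() (alternative decomposition, same cost).

-- ===== PORT A =====
-- the module-level 'otroci' dict, as a function (names outside the table make A raise KeyError; Pre_ excludes them, the ports read [])
def otrociF : String → List String := fun p =>
  match p with
  | "Adam" => ["Matjaž", "Cilka", "Daniel"]
  | "Aleksander" => []
  | "Alenka" => []
  | "Barbara" => []
  | "Cilka" => []
  | "Daniel" => ["Elizabeta", "Hans"]
  | "Erik" => []
  | "Elizabeta" => ["Ludvik", "Jurij", "Barbara"]
  | "Franc" => []
  | "Herman" => ["Margareta"]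
  | "Hans" => ["Herman", "Erik"]
  | "Jožef" => ["Alenka", "Aleksander", "Petra"]
  | "Jurij" => ["Franc", "Jožef"]
  | "Ludvik" => []
  | "Margareta" => []
  | "Matjaž" => ["Viljem"]
  | "Petra" => []
  | "Tadeja" => []
  | "Viljem" => ["Tadeja"]
  | _ => []

-- height of each node in the fixed, acyclic 'otroci' tree; used only as a termination measure for the ports
def htF : String → Nat := fun p =>
  match p with
  | "Adam" => 5
  | "Daniel" => 4
  | "Elizabeta" => 3
  | "Hans" => 2
  | "Jurij" => 2
  | "Matjaž" => 2
  | "Herman" => 1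
  | "Jožef" => 1
  | "Viljem" => 1
  | _ => 0

-- every child is lower in the tree (termination of port A and of the preorder helper)
theorem child_ht (p c : String) (hc : c ∈ otrociF p) : htF c < htF p := by
  unfold otrociF at hc
  split at hc <;> (try (fin_cases hc <;> decide))

-- popping a node and pushing its children shrinks the stack weight (termination of port B's while loop)
theorem children_weight (p : String) : ((otrociF p).map (fun q => 4 ^ htF q)).sum < 4 ^ htF p := by
  unfold otrociF
  split <;> first | decide | simp

def najbogatejsi (oseba : String) (denar : List (String × Int)) : String × Int :=
  let najvec := (oseba, PySem.Dict.getD (PySem.Dict.mk denar) oseba 0)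
  if otrociF oseba = [] then najvec
  else
    (otrociF oseba).attach.foldl
      (fun najvec otrok =>
        let naj_otrok := najbogatejsi otrok.1 denar
        if naj_otrok.2 > najvec.2 then naj_otrok else najvec)
      najvec
termination_by htF oseba
decreasing_by exact child_ht oseba otrok.1 otrok.2

-- ===== PORT B =====
-- the while loop of Source B; the Python list 'stack' is modelled with its top (the pop() end) at the HEAD:
-- pop() takes the head, extend(reversed(otroci[p])) prepends otroci[p] in order, so children pop left-to-right
def bStack (denar : List (String × Int)) : List String → List (String × Int) → List (String × Int)
  | [], vals => vals
  | p :: rest, vals => bStack denar (otrociF p ++ rest) (vals ++ [(p, PySem.Dict.getD (PySem.Dict.mk denar) p 0)])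
termination_by stack _ => (stack.map (fun q => 4 ^ htF q)).sum
decreasing_by
  simp only [List.map_append, List.sum_append, List.map_cons, List.sum_cons]
  have := children_weight p
  omega

def najbogatejsi_alt (oseba : String) (denar : List (String × Int)) : String × Int :=
  let vals := bStack denar [oseba] []
  match PySem.List.max? vals (fun t => t.2) with
  | some m => m
  | none => (oseba, 0)   -- unreachable: vals always contains oseba's own entry

-- ===== PRECONDITION & SPEC =====
def pvNames : List String :=
  ["Adam", "Aleksander", "Alenka", "Barbara", "Cilka", "Daniel", "Erik", "Elizabeta", "Franc",
   "Herman", "Hans", "Jožef", "Jurij", "Ludvik", "Margareta", "Matjaž", "Petra", "Tadeja", "Viljem"]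

-- the descendant subtree (root included) of each person, written out from the fixed 'otroci' table
def pvSubtree : String → List String := fun p =>
  match p with
  | "Adam" => ["Adam", "Matjaž", "Viljem", "Tadeja", "Cilka", "Daniel", "Elizabeta", "Ludvik", "Jurij", "Franc", "Jožef", "Alenka", "Aleksander", "Petra", "Barbara", "Hans", "Herman", "Margareta", "Erik"]
  | "Aleksander" => ["Aleksander"]
  | "Alenka" => ["Alenka"]
  | "Barbara" => ["Barbara"]
  | "Cilka" => ["Cilka"]
  | "Daniel" => ["Daniel", "Elizabeta", "Ludvik", "Jurij", "Franc", "Jožef", "Alenka", "Aleksander", "Petra", "Barbara", "Hans", "Herman", "Margareta", "Erik"]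
  | "Erik" => ["Erik"]
  | "Elizabeta" => ["Elizabeta", "Ludvik", "Jurij", "Franc", "Jožef", "Alenka", "Aleksander", "Petra", "Barbara"]
  | "Franc" => ["Franc"]
  | "Herman" => ["Herman", "Margareta"]
  | "Hans" => ["Hans", "Herman", "Margareta", "Erik"]
  | "Jožef" => ["Jožef", "Alenka", "Aleksander", "Petra"]
  | "Jurij" => ["Jurij", "Franc", "Jožef", "Alenka", "Aleksander", "Petra"]
  | "Ludvik" => ["Ludvik"]
  | "Margareta" => ["Margareta"]
  | "Matjaž" => ["Matjaž", "Viljem", "Tadeja"]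
  | "Petra" => ["Petra"]
  | "Tadeja" => ["Tadeja"]
  | "Viljem" => ["Viljem"]
  | _ => []

-- A raises KeyError exactly when oseba is not a key of 'otroci' or some member of oseba's subtree has no entry in denar; Pre_ excludes those inputs.
def Pre_najbogatejsi (oseba : String) (denar : List (String × Int)) : Prop :=
  oseba ∈ pvNames ∧ ∀ q ∈ pvSubtree oseba, (PySem.Dict.get? (PySem.Dict.mk denar) q).isSome = true
instance (oseba : String) (denar : List (String × Int)) : Decidable (Pre_najbogatejsi oseba denar) := by unfold Pre_najbogatejsi; infer_instance

def pvWitness_najbogatejsi : String × (List (String × Int)) :=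
  ("Hans", [("Hans", 3), ("Herman", 7), ("Margareta", 2), ("Erik", 7)])

def Spec_najbogatejsi (oseba : String) (denar : List (String × Int)) (out : String × Int) : Prop := out = najbogatejsi_alt oseba denar
instance (oseba : String) (denar : List (String × Int)) (out : String × Int) : Decidable (Spec_najbogatejsi oseba denar out) := by unfold Spec_najbogatejsi; infer_instance

-- ===== CLAIM (what is proved, stated in full; the proofs are below) =====
def Claim_equal_najbogatejsi : Prop := ∀ (oseba : String) (denar : List (String × Int)), Dom_najbogatejsi oseba denar → Pre_najbogatejsi oseba denar → Spec_najbogatejsi oseba denar (najbogatejsi oseba denar)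

-- ===== LEMMAS AND PROOFS =====

-- A's update step (also max()'s first-max step): keep the earlier element on ties
def pvStep (a b : String × Int) : String × Int := if a.2 < b.2 then b else a

def pvPair (d : List (String × Int)) (q : String) : String × Int := (q, PySem.Dict.getD (PySem.Dict.mk d) q 0)

-- the preorder listing of the subtree of p
def pvPre (p : String) : List String :=
  p :: (otrociF p).attach.flatMap (fun c => pvPre c.1)
termination_by htF p
decreasing_by exact child_ht p c.1 c.2

theorem attach_foldl_elim {α β : Type} (l : List α) (F : β → α → β) (init : β) :
    l.attach.foldl (fun acc c => F acc c.1) init = l.foldl F init := by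
  rw [← List.foldl_map, List.attach_map_subtype_val]

theorem pvPre_eq (p : String) : pvPre p = p :: (otrociF p).flatMap pvPre := by
  rw [pvPre]
  congr 1
  conv_rhs => rw [← List.attach_map_subtype_val (otrociF p)]
  rw [List.flatMap_map]

theorem pvStep_assoc (a b c : String × Int) : pvStep (pvStep a b) c = pvStep a (pvStep b c) := by
  unfold pvStep
  split_ifs <;> first | rfl | omega

theorem foldl_pvStep_step (l : List (String × Int)) : ∀ (a x : String × Int),
    List.foldl pvStep (pvStep a x) l = pvStep a (List.foldl pvStep x l) := by
  induction l with
  | nil => intro a x; rfl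
  | cons y t ih =>
    intro a x
    simp only [List.foldl_cons]
    rw [pvStep_assoc, ih]

theorem max?_eq_foldl (x : String × Int) (t : List (String × Int)) :
    PySem.List.max? (x :: t) (fun p => p.2) = some (t.foldl pvStep x) := by
  simp only [PySem.List.max?]
  induction t generalizing x with
  | nil => rfl
  | cons y t ih =>
    simp only [List.foldl_cons]
    rw [show (if x.2 < y.2 then some y else some x) = some (pvStep x y) by unfold pvStep; split <;> rfl]
    exact ih (pvStep x y)

theorem fold_children (d : List (String × Int)) (cs : List String)
    (hIH : ∀ c ∈ cs, najbogatejsi c d = List.foldl pvStep (pvPair d c) (((otrociF c).flatMap pvPre).map (pvPair d))) :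
    ∀ init, cs.foldl (fun acc q => pvStep acc (najbogatejsi q d)) init
      = List.foldl pvStep init ((cs.flatMap pvPre).map (pvPair d)) := by
  induction cs with
  | nil => intro init; rfl
  | cons c t ih =>
    intro init
    simp only [List.foldl_cons, List.flatMap_cons, List.map_append]
    rw [List.foldl_append]
    have hc : List.foldl pvStep init ((pvPre c).map (pvPair d)) = pvStep init (najbogatejsi c d) := by
      rw [pvPre_eq, List.map_cons, List.foldl_cons, foldl_pvStep_step,
          ← hIH c (List.mem_cons_self)]
    rw [hc]
    exact ih (fun c' hc' => hIH c' (List.mem_cons_of_mem _ hc')) _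
  
theorem A_char : ∀ (n : Nat) (p : String), htF p ≤ n → ∀ d,
    najbogatejsi p d = List.foldl pvStep (pvPair d p) (((otrociF p).flatMap pvPre).map (pvPair d)) := by
  intro n
  induction n with
  | zero =>
    intro p hp d
    have hnil : otrociF p = [] := by
      cases hc : otrociF p with
      | nil => rfl
      | cons c cs =>
        have := child_ht p c (by simp [hc])
        omega
    rw [najbogatejsi]
    simp [hnil, pvPair]
  | succ n ih =>
    intro p hp d
    rw [najbogatejsi]
    by_cases hnil : otrociF p = []
    · simp [hnil, pvPair]
    · simp only [hnil, if_false]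
      have hbody : (fun (najvec : String × Int) (otrok : {x // x ∈ otrociF p}) =>
          if (najbogatejsi otrok.1 d).2 > najvec.2 then najbogatejsi otrok.1 d else najvec)
          = (fun acc c => pvStep acc (najbogatejsi c.1 d)) := by
        funext a c
        simp only [pvStep, gt_iff_lt]
      rw [hbody, attach_foldl_elim (otrociF p)
            (F := fun acc q => pvStep acc (najbogatejsi q d))]
      exact fold_children d (otrociF p)
        (fun c hc => ih c (by have := child_ht p c hc; omega) d) _

theorem B_char_aux (d : List (String × Int)) : ∀ (n : Nat) (stack : List String),
    (stack.map (fun q => 4 ^ htF q)).sum ≤ n → ∀ (vals : List (String × Int)),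
    bStack d stack vals = vals ++ (stack.flatMap pvPre).map (pvPair d) := by
  intro n
  induction n with
  | zero =>
    intro stack hw vals
    cases stack with
    | nil => simp [bStack]
    | cons p rest =>
      exfalso
      have h1 : 1 ≤ 4 ^ htF p := Nat.one_le_pow _ _ (by omega)
      simp only [List.map_cons, List.sum_cons] at hw
      omega
  | succ n ih =>
    intro stack hw vals
    cases stack with
    | nil => simp [bStack]
    | cons p rest =>
      rw [bStack]
      rw [ih (otrociF p ++ rest)
            (by
              simp only [List.map_append, List.sum_append] at *
              have := children_weight p
              simp only [List.map_cons, List.sum_cons] at hw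
              omega)]
      simp only [List.flatMap_cons, List.flatMap_append, List.map_append]
      rw [pvPre_eq]
      simp [pvPair, List.append_assoc]

theorem B_char (d : List (String × Int)) (stack : List String) (vals : List (String × Int)) :
    bStack d stack vals = vals ++ (stack.flatMap pvPre).map (pvPair d) :=
  B_char_aux d ((stack.map (fun q => 4 ^ htF q)).sum) stack le_rfl vals

-- ===== VERDICT (by name: the statement is the Claim_ definition above) =====
theorem najbogatejsi_spec : Claim_equal_najbogatejsi := by
  intro oseba denar _hDom _hPre
  show najbogatejsi oseba denar = najbogatejsi_alt oseba denar
  unfold najbogatejsi_alt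
  rw [B_char denar [oseba] []]
  simp only [List.flatMap_cons, List.flatMap_nil, List.append_nil, List.nil_append]
  rw [pvPre_eq, List.map_cons]
  rw [max?_eq_foldl]
  exact A_char (htF oseba) oseba le_rfl denar
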